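-- pv_equiv track=rewrite | github.com/davtran/algorithm-practice | Python/Practice/Templates/binary_search.py | condition_based_binary_search
-- ===== SOURCE A (Python) =====
-- def condition_based_binary_search(arr, target):
--     """
--     Binary search based on a condition to find the first index where the condition is met
--     """
--     n = len(arr)
--     left = 0
--     right = n - 1
--
--     while left < right:
--         mid = (left + right) // 2
--
--         if arr[mid]:
--             right = mid
--         else:
--             left = mid + 1
--     return left
-- ===== SOURCE B (Python) =====
-- def condition_based_binary_search(arr, target):
--     """Shrinking-slice re-implementation: keep the current interval as a
--     sublist plus its offset instead of (left, right) indices."""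
--     sub = list(arr)
--     base = 0
--     while len(sub) > 1:
--         m = (len(sub) - 1) // 2
--         if sub[m]:
--             sub = sub[:m + 1]
--         else:
--             base += m + 1
--             sub = sub[m + 1:]
--     return base
-- ===== Notes on version B (the rewrite author's own statement) =====
-- stated objective: alternative
-- what changed: Replaced the (left, right) index bisection by a shrinking-slice loop: the current interval is kept as an actual sublist plus an integer offset, halving the list itself each step; same midpoint rule, same result.
import Mathlib
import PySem

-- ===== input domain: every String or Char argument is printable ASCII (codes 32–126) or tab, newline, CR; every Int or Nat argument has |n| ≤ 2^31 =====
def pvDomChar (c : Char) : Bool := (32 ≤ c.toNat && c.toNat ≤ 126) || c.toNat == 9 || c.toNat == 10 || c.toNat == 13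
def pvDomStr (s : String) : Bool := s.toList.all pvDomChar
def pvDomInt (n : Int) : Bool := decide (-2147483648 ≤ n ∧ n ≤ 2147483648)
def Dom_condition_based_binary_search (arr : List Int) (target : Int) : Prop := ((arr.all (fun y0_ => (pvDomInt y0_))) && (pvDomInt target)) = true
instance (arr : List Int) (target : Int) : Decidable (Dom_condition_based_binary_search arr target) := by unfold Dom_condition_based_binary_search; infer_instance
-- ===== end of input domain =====

-- B replaces A's (left, right) index bisection by a shrinking-slice loop: the interval is
-- an actual sublist plus an integer offset, halved in place each step (objective: alternative).

-- ===== PORT A =====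
-- A's while-loop with state (left, right); Python truthiness of arr[mid] = value ≠ 0.
-- Fuel (≥ the interval width, which strictly shrinks) only makes the loop structural.
def pvLoopA (arr : List Int) (left right : Int) : Nat → Int
  | 0 => left
  | fuel + 1 =>
    if left < right then
      let mid := PySem.Int.floordiv (left + right) 2
      if (PySem.List.pyGet? arr mid).getD 0 ≠ 0 then
        pvLoopA arr left mid fuel
      else
        pvLoopA arr (mid + 1) right fuel
    else left

def condition_based_binary_search (arr : List Int) (target : Int) : Int :=
  pvLoopA arr 0 ((arr.length : Int) - 1) arr.length

-- ===== PORT B =====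
-- Source B's while-loop over (sub, base).  m = (len(sub)-1)//2 is a Python floor division of a
-- nonnegative int, so Nat division is exact; sub[:m+1] / sub[m+1:] are PySem slices.
def pvShrinkB (sub : List Int) (base : Int) : Int :=
  if h : 1 < sub.length then
    let m : Nat := (sub.length - 1) / 2
    if (PySem.List.pyGet? sub (m : Int)).getD 0 ≠ 0 then
      pvShrinkB (PySem.List.slice sub none (some ((m : Int) + 1))) base
    else
      pvShrinkB (PySem.List.slice sub (some ((m : Int) + 1)) none) (base + (m : Int) + 1)
  else base
termination_by sub.length
decreasing_by
  · have h1 : ((m : Int) + 1) = (((m + 1 : Nat) : Int)) := by push_cast; ring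
    rw [h1, PySem.List.slice_to_natCast]
    simp only [List.length_take]
    omega
  · have h1 : ((m : Int) + 1) = (((m + 1 : Nat) : Int)) := by push_cast; ring
    rw [h1, PySem.List.slice_from_natCast]
    simp only [List.length_drop]
    omega

def condition_based_binary_search_alt (arr : List Int) (target : Int) : Int :=
  pvShrinkB arr 0

-- ===== PRECONDITION & SPEC =====
def Spec_condition_based_binary_search (arr : List Int) (target : Int) (out : Int) : Prop := out = condition_based_binary_search_alt arr target
instance (arr : List Int) (target : Int) (out : Int) : Decidable (Spec_condition_based_binary_search arr target out) := by unfold Spec_condition_based_binary_search; infer_instance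

-- ===== CLAIM =====
def Claim_equal_condition_based_binary_search : Prop := ∀ (arr : List Int) (target : Int), Dom_condition_based_binary_search arr target → Spec_condition_based_binary_search arr target (condition_based_binary_search arr target)

-- ===== LEMMAS AND PROOFS =====
-- Invariant: A's interval [left, right] is B's sublist arr[left : right+1] with offset left.
theorem pvLoopA_eq_pvShrinkB (arr : List Int) :
    ∀ (fuel : Nat) (left right : Int), 0 ≤ left → right < (arr.length : Int) →
      (right - left).toNat ≤ fuel →
      pvLoopA arr left right fuel
        = pvShrinkB ((arr.drop left.toNat).take (right + 1 - left).toNat) left := by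
  intro fuel
  induction fuel with
  | zero =>
    intro left right h0 hr hf
    rw [pvLoopA, pvShrinkB]
    have : ¬ 1 < ((arr.drop left.toNat).take (right + 1 - left).toNat).length := by
      simp only [List.length_take, List.length_drop]
      omega
    rw [dif_neg this]
  | succ fuel ih =>
    intro left right h0 hr hf
    rw [pvLoopA, pvShrinkB]
    by_cases hlr : left < right
    · have hgt : 1 < ((arr.drop left.toNat).take (right + 1 - left).toNat).length := by
        simp only [List.length_take, List.length_drop]
        omega
      rw [if_pos hlr, dif_pos hgt]
      simp only [List.length_take, List.length_drop]
      have hmin : min (right + 1 - left).toNat (arr.length - left.toNat)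
          = (right + 1 - left).toNat := by omega
      rw [hmin]
      generalize hM : ((right + 1 - left).toNat - 1) / 2 = M
      have hM2 : 2 * M ≤ (right + 1 - left).toNat - 1 ∧
          (right + 1 - left).toNat - 1 < 2 * M + 2 := by omega
      have hmid : PySem.Int.floordiv (left + right) 2 = left + (M : Int) := by
        rw [PySem.Int.floordiv_eq_ediv_of_pos (by omega)]
        omega
      have hidx : left.toNat + M < arr.length := by omega
      have hq : ((arr.drop left.toNat).take (right + 1 - left).toNat)[M]?
          = arr[left.toNat + M]? := by
        rw [List.getElem?_take_of_lt (by omega), List.getElem?_drop]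
      have hgetB : (PySem.List.pyGet? ((arr.drop left.toNat).take (right + 1 - left).toNat)
          (M : Int)).getD 0 = arr[left.toNat + M]'hidx := by
        simp only [PySem.List.pyGet?_natCast, hq, List.getElem?_eq_getElem hidx,
          Option.getD_some]
      have hgetA : (PySem.List.pyGet? arr (PySem.Int.floordiv (left + right) 2)).getD 0
          = arr[left.toNat + M]'hidx := by
        rw [hmid]
        have hcast : left + (M : Int) = ((left.toNat + M : Nat) : Int) := by omega
        rw [hcast, PySem.List.pyGet?_natCast]
        simp [List.getElem?_eq_getElem hidx]
      by_cases htr : arr[left.toNat + M]'hidx ≠ 0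
      · rw [if_pos (by rw [hgetA]; exact htr), if_pos (by rw [hgetB]; exact htr)]
        -- A recurses on (left, left+M); B recurses on sub[:M+1]
        rw [hmid]
        rw [ih left (left + (M : Int)) h0 (by omega) (by omega)]
        have h1 : ((M : Int) + 1) = (((M + 1 : Nat) : Int)) := by push_cast; ring
        rw [h1, PySem.List.slice_to_natCast, List.take_take]
        congr 2
        omega
      · rw [if_neg (by rw [hgetA]; exact htr), if_neg (by rw [hgetB]; exact htr)]
        -- A recurses on (left+M+1, right); B recurses on sub[M+1:] with offset + M+1
        rw [hmid]
        rw [ih (left + (M : Int) + 1) right (by omega) hr (by omega)]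
        have h1 : ((M : Int) + 1) = (((M + 1 : Nat) : Int)) := by push_cast; ring
        have e1 : (left + (M : Int) + 1).toNat = left.toNat + (M + 1) := by omega
        have e2 : (right + 1 - (left + (M : Int) + 1)).toNat
            = (right + 1 - left).toNat - (M + 1) := by omega
        rw [h1, PySem.List.slice_from_natCast, List.drop_take, List.drop_drop, e1, e2]
    · have : ¬ 1 < ((arr.drop left.toNat).take (right + 1 - left).toNat).length := by
        simp only [List.length_take, List.length_drop]
        omega
      rw [if_neg hlr, dif_neg this]

-- ===== VERDICT =====
theorem condition_based_binary_search_spec : Claim_equal_condition_based_binary_search := by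
  intro arr target _
  unfold Spec_condition_based_binary_search condition_based_binary_search condition_based_binary_search_alt
  have h := pvLoopA_eq_pvShrinkB arr arr.length 0 ((arr.length : Int) - 1)
    (by omega) (by omega) (by omega)
  rw [h]
  congr 1
  simp
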